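-- pv_equiv track=rewrite | github.com/bent1e/Monet | Easyr1-temp/verl/workers/rollout/rstar_deepthink/agents/utils.py | on_annotated_path
-- ===== SOURCE A (Python) =====
-- def on_annotated_path(node_tag):
--     if node_tag == '0':
--         return True
--     ids = node_tag.split('.')[1:]
--     for i in ids:
--         if i!='1':
--             return False
--     return True
-- ===== SOURCE B (Python) =====
-- def on_annotated_path(node_tag):
--     # One-pass DFA over the characters: the first dot-segment may be anything;
--     # every later segment must be exactly '1'.
--     # state 0: inside the first segment; 1: just saw '.', need a '1'; 2: saw the '1', need '.' or end
--     state = 0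
--     for c in node_tag:
--         if state == 0:
--             if c == '.':
--                 state = 1
--         elif state == 1:
--             if c != '1':
--                 return False
--             state = 2
--         else:  # state == 2
--             if c != '.':
--                 return False
--             state = 1
--     return state != 1
-- ===== Notes on version B (the rewrite author's own statement) =====
-- stated objective: alternative
-- what changed: Replaced the split-into-segments-then-loop with a single character-level finite automaton that never materialises the segment list (and drops the redundant '0' special case).
import Mathlib
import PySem

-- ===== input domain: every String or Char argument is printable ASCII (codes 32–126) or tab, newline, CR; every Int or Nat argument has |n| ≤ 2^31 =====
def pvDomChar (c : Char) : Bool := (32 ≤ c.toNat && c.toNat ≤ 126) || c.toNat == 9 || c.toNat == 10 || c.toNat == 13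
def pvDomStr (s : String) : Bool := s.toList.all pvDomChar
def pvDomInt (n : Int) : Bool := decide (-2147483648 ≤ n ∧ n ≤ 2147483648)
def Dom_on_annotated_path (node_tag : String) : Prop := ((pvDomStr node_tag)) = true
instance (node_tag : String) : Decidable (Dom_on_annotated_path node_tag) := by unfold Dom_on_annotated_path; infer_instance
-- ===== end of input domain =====

-- B changes A's split-then-loop into a single character-level automaton (alternative decomposition; same cost).

-- ===== PORT A =====
-- the 'for i in ids: if i != '1': return False' loop, with its early return
def onAnnotatedLoopA : List String → Bool
  | [] => true
  | i :: rest => if i != "1" then false else onAnnotatedLoopA rest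

def on_annotated_path (node_tag : String) : Bool :=
  if node_tag == "0" then true
  else
    let ids := PySem.List.slice ((PySem.Str.split? node_tag ".").getD []) (some 1) none
    onAnnotatedLoopA ids

-- ===== PORT B =====
-- DFA states: 0 = inside first segment; 1 = just saw '.', need '1'; 2 = saw the '1', need '.' or end
def onAnnotatedDFA : Nat → List Char → Bool
  | st, [] => st != 1
  | 0, c :: t => onAnnotatedDFA (if c = '.' then 1 else 0) t
  | 1, c :: t => if c != '1' then false else onAnnotatedDFA 2 t
  | _+2, c :: t => if c != '.' then false else onAnnotatedDFA 1 t

def on_annotated_path_alt (node_tag : String) : Bool :=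
  onAnnotatedDFA 0 node_tag.toList

-- ===== PRECONDITION & SPEC =====
def Spec_on_annotated_path (node_tag : String) (out : Bool) : Prop := out = on_annotated_path_alt node_tag
instance (node_tag : String) (out : Bool) : Decidable (Spec_on_annotated_path node_tag out) := by unfold Spec_on_annotated_path; infer_instance

-- ===== CLAIM (what is proved, stated in full; the proofs are below) =====
def Claim_equal_on_annotated_path : Prop := ∀ (node_tag : String), Dom_on_annotated_path node_tag → Spec_on_annotated_path node_tag (on_annotated_path node_tag)

-- ===== LEMMAS AND PROOFS =====

-- structural recursion computing (first segment, remaining segments) of a split on '.'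
def mySplit : List Char → List Char × List (List Char)
  | [] => ([], [])
  | c :: t =>
      let p := mySplit t
      if c = '.' then ([], p.1 :: p.2) else (c :: p.1, p.2)

theorem splitOn_go_eq (fuel : Nat) (l cur : List Char) (acc : List (List Char))
    (h : l.length < fuel) :
    PySem.Chars.splitOn.go ['.'] fuel l cur acc
      = acc.reverse ++ (cur.reverse ++ (mySplit l).1) :: (mySplit l).2 := by
  induction fuel generalizing l cur acc with
  | zero => omega
  | succ fuel ih =>
    cases l with
    | nil => simp [PySem.Chars.splitOn.go, mySplit]
    | cons c t =>
      by_cases hc : c = '.'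
      · subst hc
        rw [PySem.Chars.splitOn.go]
        simp only [List.isPrefixOf, beq_self_eq_true, Bool.true_and,
          if_true, List.length_cons, List.length_nil, List.drop_succ_cons, List.drop_zero]
        rw [ih t [] (cur.reverse :: acc) (by simpa using Nat.lt_of_succ_lt_succ h)]
        simp [mySplit]
      · rw [PySem.Chars.splitOn.go]
        have hp : (['.'].isPrefixOf (c :: t)) = false := by
          simp [List.isPrefixOf]; exact fun h' => (hc h'.symm).elim
        rw [hp]
        simp only [Bool.false_eq_true, if_false]
        rw [ih t (c :: cur) acc (by simpa using Nat.lt_of_succ_lt_succ h)]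
        simp [mySplit, hc]

theorem splitOn_eq (l : List Char) :
    PySem.Chars.splitOn l ['.'] = (mySplit l).1 :: (mySplit l).2 := by
  unfold PySem.Chars.splitOn
  rw [splitOn_go_eq (l.length + 1) l [] [] (by omega)]
  simp

-- A's loop is an 'all' over the segments
theorem loopA_eq_all (ids : List String) :
    onAnnotatedLoopA ids = ids.all (· == "1") := by
  induction ids with
  | nil => rfl
  | cons i rest ih =>
    by_cases h : i = "1" <;> simp [onAnnotatedLoopA, h, ih]

-- the DFA in states 1 and 2, characterised by mySplit
theorem dfa_states_12 (l : List Char) :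
    (onAnnotatedDFA 1 l = ((mySplit l).1 == ['1'] && (mySplit l).2.all (· == ['1'])))
    ∧ (onAnnotatedDFA 2 l = ((mySplit l).1 == [] && (mySplit l).2.all (· == ['1']))) := by
  induction l with
  | nil => simp [onAnnotatedDFA, mySplit]
  | cons c t ih =>
    obtain ⟨ih1, ih2⟩ := ih
    constructor
    · by_cases h1 : c = '1'
      · subst h1
        simp [onAnnotatedDFA, mySplit, ih2]
      · by_cases hd : c = '.' <;>
          simp [onAnnotatedDFA, mySplit, h1, hd]
    · by_cases hd : c = '.'
      · subst hd; simp [onAnnotatedDFA, mySplit, ih1]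
      · simp [onAnnotatedDFA, mySplit, hd]

-- the DFA from state 0 checks exactly the tail segments
theorem dfa_state_0 (l : List Char) :
    onAnnotatedDFA 0 l = (mySplit l).2.all (· == ['1']) := by
  induction l with
  | nil => simp [onAnnotatedDFA, mySplit]
  | cons c t ih =>
    by_cases hd : c = '.'
    · subst hd
      simp [onAnnotatedDFA, mySplit, (dfa_states_12 t).1]
    · simp [onAnnotatedDFA, mySplit, hd, ih]

theorem string_all_eq (L : List (List Char)) :
    (L.map String.ofList).all (· == "1") = L.all (· == ['1']) := by
  induction L with
  | nil => rfl
  | cons h t ih =>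
    have : (String.ofList h == "1") = (h == ['1']) := by
      simp [← String.toList_inj]
    simp [this, ih]

-- ===== VERDICT (by name: the statement is the Claim_ definition above) =====
theorem on_annotated_path_spec : Claim_equal_on_annotated_path := by
  intro node_tag _
  unfold Spec_on_annotated_path on_annotated_path on_annotated_path_alt
  have key : onAnnotatedLoopA
      (PySem.List.slice ((PySem.Str.split? node_tag ".").getD []) (some 1) none)
      = onAnnotatedDFA 0 node_tag.toList := by
    rw [PySem.List.slice_from _ (by norm_num)]
    simp only [PySem.Str.split?, PySem.Chars.split?]
    norm_num
    have hdot : (".".toList) = ['.'] := rfl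
    rw [hdot, splitOn_eq, dfa_state_0, loopA_eq_all]
    simpa using string_all_eq (mySplit node_tag.toList).2
  by_cases h0 : node_tag = "0"
  · subst h0
    decide
  · simp only [beq_iff_eq, h0, if_false]
    exact key
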